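-- pv_equiv track=rewrite | github.com/pooty3/mrt | functions.py | validstation
-- ===== SOURCE A (Python) =====
-- def validstation(String):
--     stations=[]
--     for i in range(1,30):
--         stations=stations+['EW'+str(i)]
--     for i in range (1,29):
--         stations=stations+['NS'+str(i)]
--     for i in range(1,30):
--         stations=stations+['CC'+str(i)]
--     for i in range(1,18):
--         stations=stations+['NE'+str(i)]
--     for i in range(1,20):
--         stations=stations+['DT'+str(i)]
--     for i in range (1,7):
--         stations=stations+['BP'+str(i)]
--     stations=stations+['CG1','CG2','CE1','CE2']
--     yes=False
--     for name in stations: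
--         if name==String:
--             yes=True
--     return yes
-- ===== SOURCE B (Python) =====
-- _MAX = {'EW': 29, 'NS': 28, 'CC': 29, 'NE': 17, 'DT': 19, 'BP': 6}
--
-- def validstation(String):
--     if String in ('CG1', 'CG2', 'CE1', 'CE2'):
--         return True
--     pre, rest = String[:2], String[2:]
--     m = _MAX.get(pre)
--     if m is None or not rest.isdigit():
--         return False
--     n = int(rest)
--     return str(n) == rest and 1 <= n <= m
-- ===== Notes on version B (the rewrite author's own statement) =====
-- stated objective: simpler
-- what changed: B parses the input (prefix lookup in a 6-entry max-index dict plus a canonical-decimal suffix check) instead of building the full 128-name station list with repeated list concatenation and scanning it to the end.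
import Mathlib
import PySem

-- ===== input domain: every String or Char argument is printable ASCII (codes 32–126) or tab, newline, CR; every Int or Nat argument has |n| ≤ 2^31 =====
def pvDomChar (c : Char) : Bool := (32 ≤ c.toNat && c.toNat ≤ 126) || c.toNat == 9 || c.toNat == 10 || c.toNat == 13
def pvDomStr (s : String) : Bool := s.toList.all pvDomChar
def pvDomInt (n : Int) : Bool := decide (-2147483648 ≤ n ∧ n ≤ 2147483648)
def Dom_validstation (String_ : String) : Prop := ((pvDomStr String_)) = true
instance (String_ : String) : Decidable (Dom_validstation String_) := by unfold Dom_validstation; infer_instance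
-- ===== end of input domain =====

-- B replaces A's build-the-whole-station-list-and-scan-it with direct parsing of the
-- input (prefix lookup + canonical decimal suffix check); objective: simpler.
-- Strings are ported on the List Char side per the PySem convention.

-- ===== PORT A =====
-- A's station list, built exactly as A builds it: six range loops, each appending
-- prefix + str(i) as a one-element list, then the four branch-extension names.
def validstationStations : List (List Char) :=
  let stations : List (List Char) := []
  let stations := (PySem.List.pyRange 1 30).foldl (fun st i => st ++ [['E','W'] ++ PySem.Int.toChars i]) stations
  let stations := (PySem.List.pyRange 1 29).foldl (fun st i => st ++ [['N','S'] ++ PySem.Int.toChars i]) stations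
  let stations := (PySem.List.pyRange 1 30).foldl (fun st i => st ++ [['C','C'] ++ PySem.Int.toChars i]) stations
  let stations := (PySem.List.pyRange 1 18).foldl (fun st i => st ++ [['N','E'] ++ PySem.Int.toChars i]) stations
  let stations := (PySem.List.pyRange 1 20).foldl (fun st i => st ++ [['D','T'] ++ PySem.Int.toChars i]) stations
  let stations := (PySem.List.pyRange 1 7).foldl (fun st i => st ++ [['B','P'] ++ PySem.Int.toChars i]) stations
  stations ++ [['C','G','1'],['C','G','2'],['C','E','1'],['C','E','2']]

-- the final scan: for name in stations: if name == String: yes = True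
def validstationCore (t : List Char) : Bool :=
  validstationStations.foldl (fun yes name => if name = t then true else yes) false

def validstation (String_ : String) : Bool :=
  validstationCore String_.toList

-- ===== PORT B =====
-- _MAX = {'EW': 29, 'NS': 28, 'CC': 29, 'NE': 17, 'DT': 19, 'BP': 6}
def validstationMax : PySem.Dict (List Char) Int :=
  ⟨[(['E','W'],29),(['N','S'],28),(['C','C'],29),(['N','E'],17),(['D','T'],19),(['B','P'],6)]⟩

def validstationAltCore (s : List Char) : Bool :=
  if s = ['C','G','1'] ∨ s = ['C','G','2'] ∨ s = ['C','E','1'] ∨ s = ['C','E','2'] then true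
  else
    let pre := PySem.List.slice s (some 0) (some 2)
    let rest := PySem.List.slice s (some 2) none
    match PySem.Dict.get? validstationMax pre with
    | none => false
    | some m =>
      if PySem.Chars.strIsdigit rest then
        match PySem.Int.ofChars? rest with
        | none => false
        | some n => decide (PySem.Int.toChars n = rest) && decide (1 ≤ n) && decide (n ≤ m)
      else false

def validstation_alt (String_ : String) : Bool :=
  validstationAltCore String_.toList

-- ===== PRECONDITION & SPEC =====
def Spec_validstation (String_ : String) (out : Bool) : Prop := out = validstation_alt String_
instance (String_ : String) (out : Bool) : Decidable (Spec_validstation String_ out) := by unfold Spec_validstation; infer_instance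

-- ===== CLAIM (what is proved, stated in full; the proofs are below) =====
def Claim_equal_validstation : Prop := ∀ (String_ : String), Dom_validstation String_ → Spec_validstation String_ (validstation String_)

-- ===== LEMMAS AND PROOFS =====

-- A's station list written as appended maps (same value; convenient for membership reasoning)
def pvLS : List (List Char) :=
  (PySem.List.pyRange 1 30).map (fun i => ['E','W'] ++ PySem.Int.toChars i) ++
  (PySem.List.pyRange 1 29).map (fun i => ['N','S'] ++ PySem.Int.toChars i) ++
  (PySem.List.pyRange 1 30).map (fun i => ['C','C'] ++ PySem.Int.toChars i) ++
  (PySem.List.pyRange 1 18).map (fun i => ['N','E'] ++ PySem.Int.toChars i) ++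
  (PySem.List.pyRange 1 20).map (fun i => ['D','T'] ++ PySem.Int.toChars i) ++
  (PySem.List.pyRange 1 7).map (fun i => ['B','P'] ++ PySem.Int.toChars i) ++
  [['C','G','1'],['C','G','2'],['C','E','1'],['C','E','2']]

set_option maxRecDepth 8192 in
lemma stations_eq_pvLS : validstationStations = pvLS := by decide

lemma foldl_if_or (l : List (List Char)) (t : List Char) (b : Bool) :
    l.foldl (fun yes name => if name = t then true else yes) b = (b || decide (t ∈ l)) := by
  induction l generalizing b with
  | nil => simp
  | cons x xs ih =>
    simp only [List.foldl_cons, ih, List.mem_cons]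
    by_cases h : x = t
    · subst h; simp
    · simp [h, Ne.symm h]

lemma A_iff (t : List Char) : validstationCore t = true ↔ t ∈ pvLS := by
  unfold validstationCore
  rw [stations_eq_pvLS, foldl_if_or]
  simp

lemma pvMaxCases (p : List Char) (m : Int) (h : PySem.Dict.get? validstationMax p = some m) :
    (p = ['E','W'] ∧ m = 29) ∨ (p = ['N','S'] ∧ m = 28) ∨ (p = ['C','C'] ∧ m = 29) ∨
    (p = ['N','E'] ∧ m = 17) ∨ (p = ['D','T'] ∧ m = 19) ∨ (p = ['B','P'] ∧ m = 6) := by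
  simp only [validstationMax, PySem.Dict.get?, List.find?_cons] at h
  repeat' split at h
  all_goals try (rename_i heq; rw [beq_iff_eq] at heq; subst heq; simp only [Option.map_some, Option.some.injEq] at h; subst h; tauto)
  simp at h

lemma B_iff (t : List Char) : validstationAltCore t = true ↔ t ∈ pvLS := by
  constructor
  · intro hB
    unfold validstationAltCore at hB
    split at hB
    · rename_i hsp
      rcases hsp with rfl | rfl | rfl | rfl <;> decide
    · simp only at hB
      split at hB
      · exact absurd hB (by simp)
      · rename_i m hget
        split at hB
        · split at hB
          · exact absurd hB (by simp)
          · rename_i n hof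
            simp only [Bool.and_eq_true, decide_eq_true_eq] at hB
            obtain ⟨⟨hrep, h1⟩, hm⟩ := hB
            have hpre : PySem.List.slice t (some 0) (some 2) = t.take 2 := by simp [pysem]
            have hrest : PySem.List.slice t (some 2) none = t.drop 2 := by simp [pysem]
            have ht : t = t.take 2 ++ PySem.Int.toChars n := by
              rw [hrep, hrest, List.take_append_drop]
            rw [hpre] at hget
            rcases pvMaxCases _ _ hget with ⟨hp, rfl⟩ | ⟨hp, rfl⟩ | ⟨hp, rfl⟩ |
              ⟨hp, rfl⟩ | ⟨hp, rfl⟩ | ⟨hp, rfl⟩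
            · rw [hp] at ht; subst ht
              simp only [pvLS, List.mem_append, List.mem_map]
              exact Or.inl (Or.inl (Or.inl (Or.inl (Or.inl (Or.inl
                ⟨n, PySem.List.mem_pyRange_one.mpr ⟨h1, by omega⟩, rfl⟩)))))
            · rw [hp] at ht; subst ht
              simp only [pvLS, List.mem_append, List.mem_map]
              exact Or.inl (Or.inl (Or.inl (Or.inl (Or.inl (Or.inr
                ⟨n, PySem.List.mem_pyRange_one.mpr ⟨h1, by omega⟩, rfl⟩)))))
            · rw [hp] at ht; subst ht
              simp only [pvLS, List.mem_append, List.mem_map]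
              exact Or.inl (Or.inl (Or.inl (Or.inl (Or.inr
                ⟨n, PySem.List.mem_pyRange_one.mpr ⟨h1, by omega⟩, rfl⟩))))
            · rw [hp] at ht; subst ht
              simp only [pvLS, List.mem_append, List.mem_map]
              exact Or.inl (Or.inl (Or.inl (Or.inr
                ⟨n, PySem.List.mem_pyRange_one.mpr ⟨h1, by omega⟩, rfl⟩)))
            · rw [hp] at ht; subst ht
              simp only [pvLS, List.mem_append, List.mem_map]
              exact Or.inl (Or.inl (Or.inr
                ⟨n, PySem.List.mem_pyRange_one.mpr ⟨h1, by omega⟩, rfl⟩))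
            · rw [hp] at ht; subst ht
              simp only [pvLS, List.mem_append, List.mem_map]
              exact Or.inl (Or.inr ⟨n, PySem.List.mem_pyRange_one.mpr ⟨h1, by omega⟩, rfl⟩)
        · exact absurd hB (by simp)
  · intro hmem
    simp only [pvLS, List.mem_append, List.mem_map, List.mem_cons, List.not_mem_nil,
      or_false] at hmem
    rcases hmem with (((((⟨i, hi, rfl⟩ | ⟨i, hi, rfl⟩) | ⟨i, hi, rfl⟩) | ⟨i, hi, rfl⟩) |
      ⟨i, hi, rfl⟩) | ⟨i, hi, rfl⟩) | (rfl | rfl | rfl | rfl)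
    · obtain ⟨h1, h2⟩ := PySem.List.mem_pyRange_one.mp hi; interval_cases i <;> decide
    · obtain ⟨h1, h2⟩ := PySem.List.mem_pyRange_one.mp hi; interval_cases i <;> decide
    · obtain ⟨h1, h2⟩ := PySem.List.mem_pyRange_one.mp hi; interval_cases i <;> decide
    · obtain ⟨h1, h2⟩ := PySem.List.mem_pyRange_one.mp hi; interval_cases i <;> decide
    · obtain ⟨h1, h2⟩ := PySem.List.mem_pyRange_one.mp hi; interval_cases i <;> decide
    · obtain ⟨h1, h2⟩ := PySem.List.mem_pyRange_one.mp hi; interval_cases i <;> decide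
    · decide
    · decide
    · decide
    · decide

lemma core_eq (t : List Char) : validstationCore t = validstationAltCore t := by
  rw [Bool.eq_iff_iff, A_iff, B_iff]

-- ===== VERDICT (by name: the statement is the Claim_ definition above) =====
theorem validstation_spec : Claim_equal_validstation := by
  intro s _
  unfold Spec_validstation validstation validstation_alt
  exact core_eq s.toList
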